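-- pv_equiv track=rewrite | github.com/Aasthaengg/IBMdataset | Python_codes/p03252/s753129706.py | get_char_set
-- ===== SOURCE A (Python) =====
-- def get_char_set(word):
--     char_index = {}
--     for i, c in enumerate(word):
--         if c not in char_index.keys():
--             char_index[c] = []
--         char_index[c].append(i)
--     char_set = set()
--     for char_index_list in char_index.values():
--         char_set.add(tuple(char_index_list))
--     return char_set
-- ===== SOURCE B (Python) =====
-- def get_char_set(word):
--     return {tuple(i for i, x in enumerate(word) if x == c) for c in dict.fromkeys(word)}
-- ===== Notes on version B (the rewrite author's own statement) =====
-- stated objective: idiomatic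
-- what changed: Replaces the incremental dict-of-lists bucket building with an ordered dedup of the characters (dict.fromkeys) plus one per-character filtering comprehension over enumerate, built directly into a set comprehension.
import Mathlib
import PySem

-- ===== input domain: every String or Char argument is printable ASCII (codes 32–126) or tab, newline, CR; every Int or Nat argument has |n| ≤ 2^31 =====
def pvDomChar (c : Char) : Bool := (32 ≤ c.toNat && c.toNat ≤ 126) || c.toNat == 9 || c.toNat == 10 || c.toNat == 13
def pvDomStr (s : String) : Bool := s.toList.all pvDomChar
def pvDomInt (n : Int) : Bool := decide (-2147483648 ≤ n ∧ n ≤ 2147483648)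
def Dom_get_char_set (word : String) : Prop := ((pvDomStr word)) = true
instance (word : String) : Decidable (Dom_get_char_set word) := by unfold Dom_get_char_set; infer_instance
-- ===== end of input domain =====

-- B groups positions by an ordered dedup of the characters (dict.fromkeys) plus one filtering
-- pass per distinct character, instead of A's incremental dict-of-lists; objective: idiomatic.

-- ===== PORT A =====
def get_char_set (word : String) : List (List Int) :=
  -- char_index = {}; for i, c in enumerate(word): if c not in keys: d[c] = []; d[c].append(i)
  let char_index : PySem.Dict Char (List Int) :=
    (PySem.List.enumerate word.toList).foldl
      (fun d p =>
        let d := if d.contains p.2 then d else d.insert p.2 []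
        d.modify p.2 [] (fun l => l ++ [p.1]))   -- the key is present here, so this is the append
      PySem.Dict.empty
  -- char_set = set(); for v in d.values(): char_set.add(tuple(v))
  char_index.values.foldl (fun s v => PySem.Set.add s v) PySem.Set.empty

-- ===== PORT B =====
def get_char_set_alt (word : String) : List (List Int) :=
  -- {tuple(i for i, x in enumerate(word) if x == c) for c in dict.fromkeys(word)}
  (PySem.List.dedup word.toList).foldl
    (fun s c =>
      PySem.Set.add s
        (((PySem.List.enumerate word.toList).filter (fun p => p.2 == c)).map (·.1)))
    PySem.Set.empty

-- ===== PRECONDITION & SPEC =====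
def Spec_get_char_set (word : String) (out : List (List Int)) : Prop := out = get_char_set_alt word
instance (word : String) (out : List (List Int)) : Decidable (Spec_get_char_set word out) := by unfold Spec_get_char_set; infer_instance

-- ===== CLAIM (what is proved, stated in full; the proofs are below) =====
def Claim_equal_get_char_set : Prop := ∀ (word : String), Dom_get_char_set word → Spec_get_char_set word (get_char_set word)

-- ===== LEMMAS AND PROOFS =====

-- A's guarded step ("insert [] if missing, then append") is exactly modify-with-default-[].
theorem stepA_eq_modify (d : PySem.Dict Char (List Int)) (c : Char) (i : Int) :
    (if d.contains c then d else d.insert c []).modify c [] (fun l => l ++ [i])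
      = d.modify c [] (fun l => l ++ [i]) := by
  cases hb : d.contains c with
  | true => simp
  | false =>
    simp only [Bool.false_eq_true, if_false, PySem.Dict.modify,
      PySem.Dict.getD_insert_self, PySem.Dict.insert_insert_self]
    rw [PySem.Dict.getD_of_not_contains d [] hb]

-- A's dict-building loop, with the guard removed.
theorem dictA_eq (word : String) :
    ((PySem.List.enumerate word.toList).foldl
      (fun d p =>
        let d := if d.contains p.2 then d else d.insert p.2 []
        d.modify p.2 [] (fun l => l ++ [p.1]))
      PySem.Dict.empty)
    = (PySem.List.enumerate word.toList).foldl
        (fun d p => d.modify p.2 [] (fun l => l ++ [p.1])) PySem.Dict.empty := by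
  congr 1
  funext d p
  exact stepA_eq_modify d p.2 p.1

-- The dict's value at any key c is the list of positions of c, via the swap of the pairs.
theorem getD_dictA (word : String) (c : Char) :
    ((PySem.List.enumerate word.toList).foldl
        (fun d p => d.modify p.2 [] (fun l => l ++ [p.1])) PySem.Dict.empty).getD c []
      = ((PySem.List.enumerate word.toList).filter (fun p => p.2 == c)).map (·.1) := by
  have hswap : (PySem.List.enumerate word.toList).foldl
      (fun d p => d.modify p.2 [] (fun l => l ++ [p.1])) PySem.Dict.empty
    = ((PySem.List.enumerate word.toList).map Prod.swap).foldl
        (fun d p => d.modify p.1 [] (fun l => l ++ [p.2])) PySem.Dict.empty := by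
    rw [List.foldl_map]
    rfl
  rw [hswap, PySem.Dict.getD_foldl_modify_append]
  simp [List.filter_map, Function.comp_def]

theorem keys_dictA (word : String) :
    ((PySem.List.enumerate word.toList).foldl
        (fun d p => d.modify p.2 [] (fun l => l ++ [p.1])) PySem.Dict.empty).keys
      = PySem.Set.ofList word.toList := by
  rw [PySem.Dict.keys_foldl_modify_key]
  simp [PySem.List.map_snd_enumerate, PySem.Dict.keys_empty, PySem.Set.update_nil_left]

theorem nodup_keys_dictA (word : String) :
    ((PySem.List.enumerate word.toList).foldl
        (fun d p => d.modify p.2 [] (fun l => l ++ [p.1])) PySem.Dict.empty).keys.Nodup := by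
  exact PySem.Dict.nodup_keys_foldl_modify_key _ _ _ _ _ PySem.Dict.nodup_keys_empty

-- ===== VERDICT (by name: the statement is the Claim_ definition above) =====
theorem get_char_set_spec : Claim_equal_get_char_set := by
  intro word _
  simp only [Spec_get_char_set, get_char_set, get_char_set_alt]
  rw [dictA_eq,
    PySem.Dict.values_eq_map_keys _ (nodup_keys_dictA word) ([] : List Int),
    keys_dictA, List.foldl_map, PySem.List.dedup_eq_ofList]
  congr 1
  funext s c
  rw [getD_dictA]
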